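-- pv_equiv track=rewrite | github.com/gio-itsolution/is_demo | my_user_manager/utils/my_search_manager.py | find_supervisor
-- ===== SOURCE A (Python) =====
-- def find_supervisor(departments_dict: dict, current_dep: str = '1', order: int = 0) -> tuple:
--     """
--     Рурсивая функция, осуществляющая поиск начальника для пользователя, если в настоящем
--     подразделении он не был найден.ек
--     """
--
--     department = departments_dict[current_dep]
--     parent_exists = ('PARENT' in department)
--     supervisor = department.get('UF_HEAD')
--     supervisor_exists = (supervisor and (supervisor != '0'))
--
--     if supervisor_exists:
--         return department['UF_HEAD'], order
--     else:
--         if not parent_exists: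
--             return "None", order
--         return find_supervisor(departments_dict, department['PARENT'], order + 1)
-- ===== SOURCE B (Python) =====
-- def find_supervisor(departments_dict: dict, current_dep: str = '1', order: int = 0) -> tuple:
--     current = current_dep
--     while True:
--         department = departments_dict[current]
--         head = department.get('UF_HEAD')
--         if head and head != '0':
--             return head, order
--         if 'PARENT' not in department:
--             return "None", order
--         current = department['PARENT']
--         order += 1
-- ===== Notes on version B (the rewrite author's own statement) =====
-- stated objective: idiomatic
-- what changed: The tail recursion is replaced by a single while loop that maintains the current department key and the depth counter in place.
import Mathlib
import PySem

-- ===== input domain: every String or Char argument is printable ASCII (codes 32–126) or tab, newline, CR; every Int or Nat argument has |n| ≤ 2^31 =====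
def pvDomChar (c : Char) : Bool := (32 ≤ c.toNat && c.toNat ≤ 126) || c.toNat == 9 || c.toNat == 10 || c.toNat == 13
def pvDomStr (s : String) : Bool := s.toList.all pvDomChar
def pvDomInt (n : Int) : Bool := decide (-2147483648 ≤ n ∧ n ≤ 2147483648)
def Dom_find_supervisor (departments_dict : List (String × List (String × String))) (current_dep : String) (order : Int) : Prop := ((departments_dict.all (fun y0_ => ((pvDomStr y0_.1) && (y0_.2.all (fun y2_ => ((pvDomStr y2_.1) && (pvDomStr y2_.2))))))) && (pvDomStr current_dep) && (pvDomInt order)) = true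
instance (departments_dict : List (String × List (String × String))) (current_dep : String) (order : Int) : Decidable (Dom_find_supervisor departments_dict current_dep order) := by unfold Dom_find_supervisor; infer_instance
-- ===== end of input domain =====

-- B replaces A's tail recursion by a single while loop over a (current, order) state; return values are identical on Pre_.

-- ===== PORT A =====
-- A is a tail recursion on the PARENT chain; in Lean it is fueled with
-- departments_dict.length + 1, which suffices for every terminating Python run
-- (a terminating run visits pairwise-distinct keys). Fuel exhaustion and a
-- missing key (Python KeyError / RecursionError, excluded by Pre_) yield ("None", order).
def findSupA (departments_dict : List (String × List (String × String))) : Nat → String → Int → String × Int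
  | 0, _, order => ("None", order)
  | fuel + 1, current_dep, order =>
    match departments_dict.find? (fun p => p.1 == current_dep) with
    | none => ("None", order)      -- Python: KeyError (outside Pre_)
    | some (_, department) =>
      let parent_exists : Bool := department.any (fun p => p.1 == "PARENT")
      let supervisor : Option String := (department.find? (fun p => p.1 == "UF_HEAD")).map (·.2)
      let supervisor_exists : Bool :=
        match supervisor with
        | none => false
        | some s => !(s == "") && !(s == "0")
      if supervisor_exists then
        (((department.find? (fun p => p.1 == "UF_HEAD")).map (·.2)).getD "", order)
      else if !parent_exists then
        ("None", order)
      else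
        findSupA departments_dict fuel
          (((department.find? (fun p => p.1 == "PARENT")).map (·.2)).getD "") (order + 1)

def find_supervisor (departments_dict : List (String × List (String × String))) (current_dep : String) (order : Int) : String × Int :=
  findSupA departments_dict (departments_dict.length + 1) current_dep order

-- ===== PORT B =====
-- one iteration of B's while-loop body: Sum.inl = return, Sum.inr = next state
def stepB (departments_dict : List (String × List (String × String))) (st : String × Int) :
    (String × Int) ⊕ (String × Int) :=
  match departments_dict.find? (fun p => p.1 == st.1) with
  | none => Sum.inl ("None", st.2)   -- Python: KeyError (outside Pre_)
  | some (_, department) =>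
    match (department.find? (fun p => p.1 == "UF_HEAD")).map (·.2) with
    | some h =>
      if !(h == "") && !(h == "0") then Sum.inl (h, st.2)
      else
        match (department.find? (fun p => p.1 == "PARENT")).map (·.2) with
        | none => Sum.inl ("None", st.2)
        | some par => Sum.inr (par, st.2 + 1)
    | none =>
      match (department.find? (fun p => p.1 == "PARENT")).map (·.2) with
      | none => Sum.inl ("None", st.2)
      | some par => Sum.inr (par, st.2 + 1)

def loopB (departments_dict : List (String × List (String × String))) : Nat → String × Int → String × Int
  | 0, st => ("None", st.2)
  | fuel + 1, st =>
    match stepB departments_dict st with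
    | Sum.inl res => res
    | Sum.inr st' => loopB departments_dict fuel st'

def find_supervisor_alt (departments_dict : List (String × List (String × String))) (current_dep : String) (order : Int) : String × Int :=
  loopB departments_dict (departments_dict.length + 1) (current_dep, order)

-- ===== PRECONDITION & SPEC =====
-- termination checker for the PARENT walk (no simulation-free closed form exists
-- for termination of a key-chain walk; this predicate only checks key membership
-- and that the chain stops, it computes no output)
def chainOk (departments_dict : List (String × List (String × String))) : String → Nat → Bool
  | _, 0 => false
  | cur, fuel + 1 =>
    match departments_dict.find? (fun p => p.1 == cur) with
    | none => false
    | some (_, department) =>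
      match (department.find? (fun p => p.1 == "UF_HEAD")).map (·.2) with
      | some h =>
        if !(h == "") && !(h == "0") then true
        else
          match (department.find? (fun p => p.1 == "PARENT")).map (·.2) with
          | none => true
          | some par => chainOk departments_dict par fuel
      | none =>
        match (department.find? (fun p => p.1 == "PARENT")).map (·.2) with
        | none => true
        | some par => chainOk departments_dict par fuel

-- Pre_ excludes exactly the inputs where Python A raises: a KeyError (current_dep or
-- some PARENT on the walk missing from the dict) or a RecursionError (a PARENT cycle).
def Pre_find_supervisor (departments_dict : List (String × List (String × String))) (current_dep : String) (order : Int) : Prop :=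
  chainOk departments_dict current_dep (departments_dict.length + 1) = true
instance (departments_dict : List (String × List (String × String))) (current_dep : String) (order : Int) : Decidable (Pre_find_supervisor departments_dict current_dep order) := by unfold Pre_find_supervisor; infer_instance

def pvWitness_find_supervisor : (List (String × List (String × String))) × String × Int :=
  ([("1", [("PARENT", "2")]), ("2", [("UF_HEAD", "7")])], "1", 0)

def Spec_find_supervisor (departments_dict : List (String × List (String × String))) (current_dep : String) (order : Int) (out : String × Int) : Prop := out = find_supervisor_alt departments_dict current_dep order
instance (departments_dict : List (String × List (String × String))) (current_dep : String) (order : Int) (out : String × Int) : Decidable (Spec_find_supervisor departments_dict current_dep order out) := by unfold Spec_find_supervisor; infer_instance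

-- ===== CLAIM (what is proved, stated in full; the proofs are below) =====
def Claim_equal_find_supervisor : Prop := ∀ (departments_dict : List (String × List (String × String))) (current_dep : String) (order : Int), Dom_find_supervisor departments_dict current_dep order → Pre_find_supervisor departments_dict current_dep order → Spec_find_supervisor departments_dict current_dep order (find_supervisor departments_dict current_dep order)

-- ===== LEMMAS AND PROOFS =====

-- step-for-step agreement at equal fuel (in fact total, the Pre_ hypothesis is not needed)
theorem findSupA_eq_loopB (departments_dict : List (String × List (String × String))) :
    ∀ (fuel : Nat) (cur : String) (order : Int),
      findSupA departments_dict fuel cur order = loopB departments_dict fuel (cur, order) := by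
  intro fuel
  induction fuel with
  | zero => intro cur order; rfl
  | succ n ih =>
    intro cur order
    simp only [findSupA, loopB, stepB]
    cases hfind : departments_dict.find? (fun p => p.1 == cur) with
    | none => rfl
    | some kv =>
      obtain ⟨k, department⟩ := kv
      cases hhead : (department.find? (fun p => p.1 == "UF_HEAD")).map (·.2) with
      | some h =>
        simp only [hhead]
        by_cases hcond : (!(h == "") && !(h == "0")) = true
        · simp [hcond]
        · simp only [Bool.not_eq_true] at hcond
          simp only [hcond, if_false, Bool.false_eq_true]
          cases hpar : (department.find? (fun p => p.1 == "PARENT")).map (·.2) with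
          | none =>
            have hnone : department.find? (fun p => p.1 == "PARENT") = none := by
              cases hps : department.find? (fun p => p.1 == "PARENT") with
              | none => rfl
              | some y => rw [hps] at hpar; simp at hpar
            have hany : department.any (fun p => p.1 == "PARENT") = false := by
              rw [List.any_eq_false]
              intro x hx
              simpa using List.find?_eq_none.mp hnone x hx
            simp [hany]
          | some par =>
            obtain ⟨y, hps⟩ : ∃ y, department.find? (fun p => p.1 == "PARENT") = some y := by
              cases hps : department.find? (fun p => p.1 == "PARENT") with
              | none => rw [hps] at hpar; simp at hpar
              | some y => exact ⟨y, rfl⟩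
            have hany : department.any (fun p => p.1 == "PARENT") = true := by
              rw [List.any_eq_true]
              exact ⟨y, List.mem_of_find?_eq_some hps, by simpa using List.find?_some hps⟩
            simp [hany, ih]
      | none =>
        simp only [hhead]
        cases hpar : (department.find? (fun p => p.1 == "PARENT")).map (·.2) with
        | none =>
          have hnone : department.find? (fun p => p.1 == "PARENT") = none := by
            cases hps : department.find? (fun p => p.1 == "PARENT") with
            | none => rfl
            | some y => rw [hps] at hpar; simp at hpar
          have hany : department.any (fun p => p.1 == "PARENT") = false := by
            rw [List.any_eq_false]
            intro x hx
            simpa using List.find?_eq_none.mp hnone x hx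
          simp [hany]
        | some par =>
          obtain ⟨y, hps⟩ : ∃ y, department.find? (fun p => p.1 == "PARENT") = some y := by
            cases hps : department.find? (fun p => p.1 == "PARENT") with
            | none => rw [hps] at hpar; simp at hpar
            | some y => exact ⟨y, rfl⟩
          have hany : department.any (fun p => p.1 == "PARENT") = true := by
            rw [List.any_eq_true]
            exact ⟨y, List.mem_of_find?_eq_some hps, by simpa using List.find?_some hps⟩
          simp [hany, ih]

-- ===== VERDICT (by name: the statement is the Claim_ definition above) =====
theorem find_supervisor_spec : Claim_equal_find_supervisor := by
  intro departments_dict current_dep order _ _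
  unfold Spec_find_supervisor find_supervisor find_supervisor_alt
  exact findSupA_eq_loopB departments_dict _ current_dep order
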